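-- pv_equiv track=rewrite | github.com/stefanwebb/coding-challenge-preparation | coderbyte/easy/even-pairs.py | EvenPairs
-- ===== SOURCE A (Python) =====
-- def EvenPairs(str):
--     starts = set()
--     ends = set()
--
--     # Search for all even numbers in string
--     for i in range(len(str)):
--         for j in range(i,len(str)):
--             if not str[j].isdigit():
--                 break
--             if int(str[i:(j+1)]) % 2 == 0:
--                 starts.add(i)
--                 ends.add(j+1)
--
--     # Check whether adjacent
--     for i in starts:
--         if i in ends:
--             return 'true'
--
--     # code goes here
--     return 'false'
-- ===== SOURCE B (Python) =====
-- def EvenPairs(str):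
--     # affirmative iff some maximal digit run contains two even digits: a decimal
--     # number is even iff its last digit is, so A's starts/ends intersect exactly then.
--     evens = 0
--     found = False
--     for ch in str:
--         if ch in '02468':
--             evens += 1
--             if evens >= 2:
--                 found = True
--         elif not ch.isdigit():
--             evens = 0
--     return 'true' if found else 'false'
-- ===== Notes on version B (the rewrite author's own statement) =====
-- stated objective: faster
-- what changed: A enumerates every substring and parses each with int() into two sets of start/end indices (O(n^3)); B is a single linear scan counting even digits in the current digit run, since a decimal number is even iff its last digit is even, so A answers affirmatively exactly when some maximal digit run contains two even digits.
import Mathlib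
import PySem

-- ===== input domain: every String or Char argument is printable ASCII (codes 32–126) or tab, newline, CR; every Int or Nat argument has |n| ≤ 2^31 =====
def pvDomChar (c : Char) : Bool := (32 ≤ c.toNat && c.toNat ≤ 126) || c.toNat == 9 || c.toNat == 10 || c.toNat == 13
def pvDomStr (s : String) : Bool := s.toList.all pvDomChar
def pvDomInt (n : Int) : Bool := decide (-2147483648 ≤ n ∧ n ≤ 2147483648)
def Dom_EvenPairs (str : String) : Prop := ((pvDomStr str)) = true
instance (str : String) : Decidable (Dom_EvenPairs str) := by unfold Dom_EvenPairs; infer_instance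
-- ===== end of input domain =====

-- B replaces A's cubic all-substrings search (sets of start/end indices, int() on every
-- all-digit substring) by one linear scan counting even digits in the current digit run.

-- ===== PORT A =====
-- int() ported by hand as the decimal fold: inside A it is only applied to slices whose
-- characters all passed str[j].isdigit() (the break guard), i.e. ASCII digit strings on the
-- domain, where Python's int(s) is exactly this fold (exact there).
def pvDigitsVal (ds : List Char) : Nat := ds.foldl (fun a c => a * 10 + (c.toNat - 48)) 0

-- the inner 'for j in range(i, len(str))' loop with its break
def pvInnerA (cs : List Char) (i j : Nat) (st : PySem.Set Nat × PySem.Set Nat) :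
    PySem.Set Nat × PySem.Set Nat :=
  if h : j < cs.length then
    if PySem.Chars.isdigit (cs.getD j ' ') = false then st
    else
      pvInnerA cs i (j + 1)
        (if pvDigitsVal (PySem.List.slice cs (some (i : Int)) (some ((j : Int) + 1))) % 2 = 0 then
          (PySem.Set.add st.1 i, PySem.Set.add st.2 (j + 1))
        else st)
  else st
termination_by cs.length - j

def EvenPairs (str : String) : String :=
  let cs := str.toList
  let st := (List.range cs.length).foldl (fun st i => pvInnerA cs i i st)
      ((PySem.Set.empty : PySem.Set Nat), (PySem.Set.empty : PySem.Set Nat))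
  -- 'for i in starts: if i in ends: return true' — order-independent (any common element)
  if st.1.any (fun x => PySem.Set.contains st.2 x) then "true" else "false"

-- ===== PORT B =====
def pvStepB (st : Nat × Bool) (c : Char) : Nat × Bool :=
  if ['0', '2', '4', '6', '8'].contains c then
    (st.1 + 1, st.2 || decide (2 ≤ st.1 + 1))
  else if PySem.Chars.isdigit c = false then (0, st.2)
  else st

def EvenPairs_alt (str : String) : String :=
  let st := str.toList.foldl pvStepB (0, false)
  if st.2 then "true" else "false"

-- ===== PRECONDITION & SPEC =====
def Spec_EvenPairs (str : String) (out : String) : Prop := out = EvenPairs_alt str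
instance (str : String) (out : String) : Decidable (Spec_EvenPairs str out) := by unfold Spec_EvenPairs; infer_instance

-- ===== CLAIM (what is proved, stated in full; the proofs are below) =====
def Claim_equal_EvenPairs : Prop := ∀ (str : String), Dom_EvenPairs str → Spec_EvenPairs str (EvenPairs str)

-- ===== LEMMAS AND PROOFS =====

-- abbreviations used only by the proofs
def pvDig (c : Char) : Bool := PySem.Chars.isdigit c
def pvEvd (c : Char) : Bool := ['0', '2', '4', '6', '8'].contains c

-- 'some even digit is reachable from the start through digits'
def pvLead : List Char → Bool
  | [] => false
  | c :: cs => pvEvd c || (pvDig c && pvLead cs)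

-- 'some even digit is immediately followed (through digits) by another even digit'
def pvP : List Char → Bool
  | [] => false
  | c :: cs => (pvEvd c && pvLead cs) || pvP cs

theorem pvDig_iff (c : Char) : pvDig c = true ↔ 48 ≤ c.toNat ∧ c.toNat ≤ 57 := by
  show (PySem.Chars.isdigit c) = true ↔ _
  rw [PySem.Chars.isdigit]
  simp only [Bool.and_eq_true, decide_eq_true_eq, Char.le_def, UInt32.le_iff_toNat_le]
  exact Iff.rfl

theorem pvCharEq (c : Char) (n : Nat) (d : Char) (hd : d.toNat = n) (h : c.toNat = n) : c = d := by
  apply Char.ext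
  apply UInt32.toNat_inj.mp
  rw [show c.val.toNat = c.toNat from rfl, show d.val.toNat = d.toNat from rfl, h, hd]

theorem pvEvd_iff (c : Char) : pvEvd c = true ↔ 48 ≤ c.toNat ∧ c.toNat ≤ 57 ∧ c.toNat % 2 = 0 := by
  have hmem : pvEvd c = true ↔ (c = '0' ∨ c = '2' ∨ c = '4' ∨ c = '6' ∨ c = '8') := by
    show (List.contains _ c) = true ↔ _
    simp only [List.contains_eq_mem, decide_eq_true_eq, List.mem_cons, List.not_mem_nil, or_false]
  rw [hmem]
  constructor
  · intro h
    rcases h with h|h|h|h|h <;> subst h <;> exact ⟨by decide, by decide, by decide⟩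
  · rintro ⟨h1, h2, h3⟩
    have : c.toNat = 48 ∨ c.toNat = 50 ∨ c.toNat = 52 ∨ c.toNat = 54 ∨ c.toNat = 56 := by omega
    rcases this with h|h|h|h|h
    · exact Or.inl (pvCharEq c 48 '0' rfl h)
    · exact Or.inr (Or.inl (pvCharEq c 50 '2' rfl h))
    · exact Or.inr (Or.inr (Or.inl (pvCharEq c 52 '4' rfl h)))
    · exact Or.inr (Or.inr (Or.inr (Or.inl (pvCharEq c 54 '6' rfl h))))
    · exact Or.inr (Or.inr (Or.inr (Or.inr (pvCharEq c 56 '8' rfl h))))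

theorem pvEvd_dig {c : Char} (h : pvEvd c = true) : pvDig c = true := by
  rw [pvDig_iff]; rw [pvEvd_iff] at h; exact ⟨h.1, h.2.1⟩

-- parity of the decimal fold is the parity of the last character's digit value
theorem pvParity (ds : List Char) (c : Char) (hc : pvDig c = true) :
    (pvDigitsVal (ds ++ [c]) % 2 = 0) ↔ pvEvd c = true := by
  rw [pvDig_iff] at hc
  rw [pvEvd_iff]
  unfold pvDigitsVal
  rw [List.foldl_append]
  simp only [List.foldl_cons, List.foldl_nil]
  omega

theorem pvStepB_eq (st : Nat × Bool) (c : Char) :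
    pvStepB st c = if pvEvd c = true then (st.1 + 1, st.2 || decide (2 ≤ st.1 + 1))
      else if pvDig c = false then (0, st.2) else st := rfl

-- B-side: the fold computes pvP
theorem pvFoldB (cs : List Char) : ∀ (e : Nat) (f : Bool),
    (cs.foldl pvStepB (e, f)).2 = (f || (decide (1 ≤ e) && pvLead cs) || pvP cs) := by
  induction cs with
  | nil => intro e f; simp [pvLead, pvP]
  | cons c cs ih =>
    intro e f
    rw [List.foldl_cons, pvStepB_eq]
    by_cases hev : pvEvd c = true
    · simp only [if_true, ih, pvLead, pvP, hev]
      simp [Bool.or_assoc, Bool.or_comm, Bool.or_left_comm]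
    · simp only [hev]
      by_cases hd : pvDig c = false
      · have hev' : pvEvd c = false := by simpa using hev
        simp [hd, ih, pvLead, pvP, hev']
      · have hd' : pvDig c = true := by simpa using hd
        have hev' : pvEvd c = false := by simpa using hev
        simp [ih, pvLead, pvP, hev', hd']

-- str[i:j+1] ends with str[j]
theorem pvSlice (cs : List Char) (i j : Nat) (hij : i ≤ j) (hj : j < cs.length) :
    PySem.List.slice cs (some (i : Int)) (some ((j : Int) + 1)) =
      ((cs.drop i).take (j - i)) ++ [cs.getD j ' '] := by
  have h1 : ((j : Int) + 1) = ((j + 1 : Nat) : Int) := by push_cast; ring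
  rw [h1, PySem.List.slice_natCast]
  have h2 : j + 1 - i = (j - i) + 1 := by omega
  rw [h2, List.take_add_one]
  congr 1
  have h3 : (cs.drop i)[j - i]? = cs[j]? := by
    rw [List.getElem?_drop]
    congr 1
    omega
  rw [h3, List.getElem?_eq_getElem hj]
  simp [List.getD, List.getElem?_eq_getElem hj]

theorem pvShiftA (cs : List Char) (j : Nat) (hd : pvDig (cs.getD j ' ') = true) (hj : j < cs.length) :
    (∃ q, j ≤ q ∧ q < cs.length ∧ pvEvd (cs.getD q ' ') = true ∧
        ∀ k, j ≤ k → k ≤ q → pvDig (cs.getD k ' ') = true) ↔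
    (pvEvd (cs.getD j ' ') = true ∨ ∃ q, j + 1 ≤ q ∧ q < cs.length ∧ pvEvd (cs.getD q ' ') = true ∧
        ∀ k, j + 1 ≤ k → k ≤ q → pvDig (cs.getD k ' ') = true) := by
  constructor
  · rintro ⟨q, hq1, hq2, hq3, hq4⟩
    rcases Nat.eq_or_lt_of_le hq1 with h|h
    · subst h; exact Or.inl hq3
    · exact Or.inr ⟨q, h, hq2, hq3, fun k hk1 hk2 => hq4 k (by omega) hk2⟩
  · rintro (h | ⟨q, hq1, hq2, hq3, hq4⟩)
    · exact ⟨j, le_refl j, hj, h, fun k hk1 hk2 => by have : k = j := by omega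
                                                      subst this; exact hd⟩
    · refine ⟨q, by omega, hq2, hq3, fun k hk1 hk2 => ?_⟩
      rcases Nat.eq_or_lt_of_le hk1 with h|h
      · subst h; exact hd
      · exact hq4 k (by omega) hk2

theorem pvShiftE (cs : List Char) (j x : Nat) (hd : pvDig (cs.getD j ' ') = true) (hj : j < cs.length) :
    (∃ q, j ≤ q ∧ q < cs.length ∧ x = q + 1 ∧ pvEvd (cs.getD q ' ') = true ∧
        ∀ k, j ≤ k → k ≤ q → pvDig (cs.getD k ' ') = true) ↔
    ((x = j + 1 ∧ pvEvd (cs.getD j ' ') = true) ∨ ∃ q, j + 1 ≤ q ∧ q < cs.length ∧ x = q + 1 ∧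
        pvEvd (cs.getD q ' ') = true ∧ ∀ k, j + 1 ≤ k → k ≤ q → pvDig (cs.getD k ' ') = true) := by
  constructor
  · rintro ⟨q, hq1, hq2, hqx, hq3, hq4⟩
    rcases Nat.eq_or_lt_of_le hq1 with h|h
    · subst h; exact Or.inl ⟨hqx, hq3⟩
    · exact Or.inr ⟨q, h, hq2, hqx, hq3, fun k hk1 hk2 => hq4 k (by omega) hk2⟩
  · rintro (⟨hx, h⟩ | ⟨q, hq1, hq2, hqx, hq3, hq4⟩)
    · exact ⟨j, le_refl j, hj, hx, h, fun k hk1 hk2 => by have : k = j := by omega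
                                                          subst this; exact hd⟩
    · refine ⟨q, by omega, hq2, hqx, hq3, fun k hk1 hk2 => ?_⟩
      rcases Nat.eq_or_lt_of_le hk1 with h|h
      · subst h; exact hd
      · exact hq4 k (by omega) hk2

-- A-side: membership after the inner loop
set_option maxHeartbeats 1000000 in
theorem pvInnerA_mem (cs : List Char) : ∀ (m i j : Nat), m = cs.length - j → i ≤ j →
    ∀ (st : PySem.Set Nat × PySem.Set Nat) (x : Nat),
    (x ∈ (pvInnerA cs i j st).1 ↔ x ∈ st.1 ∨ (x = i ∧ ∃ q, j ≤ q ∧ q < cs.length ∧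
        pvEvd (cs.getD q ' ') = true ∧ ∀ k, j ≤ k → k ≤ q → pvDig (cs.getD k ' ') = true)) ∧
    (x ∈ (pvInnerA cs i j st).2 ↔ x ∈ st.2 ∨ (∃ q, j ≤ q ∧ q < cs.length ∧ x = q + 1 ∧
        pvEvd (cs.getD q ' ') = true ∧ ∀ k, j ≤ k → k ≤ q → pvDig (cs.getD k ' ') = true)) := by
  intro m
  induction m with
  | zero =>
    intro i j hm hij st x
    have hj : ¬ (j < cs.length) := by omega
    rw [pvInnerA, dif_neg hj]
    constructor
    · constructor
      · exact Or.inl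
      · rintro (h | ⟨_, q, hq1, hq2, _⟩)
        · exact h
        · omega
    · constructor
      · exact Or.inl
      · rintro (h | ⟨q, hq1, hq2, _⟩)
        · exact h
        · omega
  | succ m ih =>
    intro i j hm hij st x
    by_cases hj : j < cs.length
    · rw [pvInnerA, dif_pos hj]
      by_cases hd : PySem.Chars.isdigit (cs.getD j ' ') = false
      · rw [if_pos hd]
        have hnd : pvDig (cs.getD j ' ') = false := hd
        constructor
        · constructor
          · exact Or.inl
          · rintro (h | ⟨_, q, hq1, hq2, _, hq4⟩)
            · exact h
            · have := hq4 j (le_refl j) hq1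
              exact absurd (hnd ▸ this) (by decide)
        · constructor
          · exact Or.inl
          · rintro (h | ⟨q, hq1, hq2, _, _, hq4⟩)
            · exact h
            · have := hq4 j (le_refl j) hq1
              exact absurd (hnd ▸ this) (by decide)
      · rw [if_neg hd]
        have hdig : pvDig (cs.getD j ' ') = true := by
          show PySem.Chars.isdigit _ = true
          simpa using hd
        have heq : (pvDigitsVal (PySem.List.slice cs (some (i : Int)) (some ((j : Int) + 1))) % 2 = 0)
            ↔ pvEvd (cs.getD j ' ') = true := by
          rw [pvSlice cs i j hij hj]
          exact pvParity _ _ hdig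
        have ih' := ih i (j + 1) (by omega) (by omega)
        by_cases hev : pvEvd (cs.getD j ' ') = true
        · rw [if_pos (heq.mpr hev)]
          obtain ⟨ih1, ih2⟩ := ih' (PySem.Set.add st.1 i, PySem.Set.add st.2 (j + 1)) x
          constructor
          · rw [ih1, PySem.Set.mem_add, pvShiftA cs j hdig hj]
            constructor
            · rintro ((h | h) | ⟨hx, hA⟩)
              · exact Or.inl h
              · exact Or.inr ⟨h, Or.inl hev⟩
              · exact Or.inr ⟨hx, Or.inr hA⟩
            · rintro (h | ⟨hx, _⟩)
              · exact Or.inl (Or.inl h)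
              · exact Or.inl (Or.inr hx)
          · rw [ih2, PySem.Set.mem_add, pvShiftE cs j x hdig hj]
            constructor
            · rintro ((h | h) | hA)
              · exact Or.inl h
              · exact Or.inr (Or.inl ⟨h, hev⟩)
              · exact Or.inr (Or.inr hA)
            · rintro (h | (⟨hx, _⟩ | hA))
              · exact Or.inl (Or.inl h)
              · exact Or.inl (Or.inr hx)
              · exact Or.inr hA
        · rw [if_neg (fun hc => hev (heq.mp hc))]
          obtain ⟨ih1, ih2⟩ := ih' st x
          have hev' : pvEvd (cs.getD j ' ') = false := by
            rcases Bool.eq_false_or_eq_true (pvEvd (cs.getD j ' ')) with h|h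
            · exact absurd h hev
            · exact h
          constructor
          · rw [ih1, pvShiftA cs j hdig hj]
            simp only [hev', Bool.false_eq_true, false_or]
          · rw [ih2, pvShiftE cs j x hdig hj]
            simp only [hev', Bool.false_eq_true, and_false, false_or]
    · rw [pvInnerA, dif_neg hj]
      constructor
      · constructor
        · exact Or.inl
        · rintro (h | ⟨_, q, hq1, hq2, _⟩)
          · exact h
          · omega
      · constructor
        · exact Or.inl
        · rintro (h | ⟨q, hq1, hq2, _⟩)
          · exact h
          · omega

-- A-side: membership after the outer loop
theorem pvOuterA_mem (cs : List Char) (l : List Nat) :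
    ∀ (st : PySem.Set Nat × PySem.Set Nat) (x : Nat),
    (x ∈ (l.foldl (fun st i => pvInnerA cs i i st) st).1 ↔ x ∈ st.1 ∨ (x ∈ l ∧ ∃ q, x ≤ q ∧
        q < cs.length ∧ pvEvd (cs.getD q ' ') = true ∧
        ∀ k, x ≤ k → k ≤ q → pvDig (cs.getD k ' ') = true)) ∧
    (x ∈ (l.foldl (fun st i => pvInnerA cs i i st) st).2 ↔ x ∈ st.2 ∨ (∃ i ∈ l, ∃ q, i ≤ q ∧
        q < cs.length ∧ x = q + 1 ∧ pvEvd (cs.getD q ' ') = true ∧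
        ∀ k, i ≤ k → k ≤ q → pvDig (cs.getD k ' ') = true)) := by
  induction l with
  | nil => intro st x; simp
  | cons i l ih =>
    intro st x
    rw [List.foldl_cons]
    obtain ⟨in1, in2⟩ := pvInnerA_mem cs (cs.length - i) i i rfl (le_refl i) st x
    obtain ⟨ih1, ih2⟩ := ih (pvInnerA cs i i st) x
    constructor
    · rw [ih1, in1]
      simp only [List.mem_cons]
      constructor
      · rintro ((h | ⟨hx, hS⟩) | ⟨hl, hS⟩)
        · exact Or.inl h
        · exact Or.inr ⟨Or.inl hx, hx ▸ hS⟩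
        · exact Or.inr ⟨Or.inr hl, hS⟩
      · rintro (h | ⟨(hx | hl), hS⟩)
        · exact Or.inl (Or.inl h)
        · exact Or.inl (Or.inr ⟨hx, hx ▸ hS⟩)
        · exact Or.inr ⟨hl, hS⟩
    · rw [ih2, in2]
      simp only [List.mem_cons]
      constructor
      · rintro ((h | hE) | ⟨i', hl, hE⟩)
        · exact Or.inl h
        · exact Or.inr ⟨i, Or.inl rfl, hE⟩
        · exact Or.inr ⟨i', Or.inr hl, hE⟩
      · rintro (h | ⟨i', (hx | hl), hE⟩)
        · exact Or.inl (Or.inl h)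
        · exact Or.inl (Or.inr (hx ▸ hE))
        · exact Or.inr ⟨i', hl, hE⟩

theorem pvGetD_drop (cs : List Char) (m k : Nat) :
    (cs.drop m).getD k ' ' = cs.getD (m + k) ' ' := by
  simp [List.getD_eq_getElem?_getD, List.getElem?_drop]

-- index characterisations of pvLead and pvP
theorem pvLead_iff (cs : List Char) : pvLead cs = true ↔ ∃ q, q < cs.length ∧
    pvEvd (cs.getD q ' ') = true ∧ ∀ k, k < q → pvDig (cs.getD k ' ') = true := by
  induction cs with
  | nil => simp [pvLead]
  | cons c cs ih =>
    rw [pvLead]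
    simp only [Bool.or_eq_true, Bool.and_eq_true, ih]
    constructor
    · rintro (h | ⟨hd, q, hq1, hq2, hq3⟩)
      · exact ⟨0, by simp, by simpa using h, by omega⟩
      · refine ⟨q + 1, by simp; omega, by simpa using hq2, ?_⟩
        intro k hk
        match k with
        | 0 => simpa using hd
        | k + 1 => simpa using hq3 k (by omega)
    · rintro ⟨q, hq1, hq2, hq3⟩
      match q with
      | 0 => exact Or.inl (by simpa using hq2)
      | q + 1 =>
        refine Or.inr ⟨by simpa using hq3 0 (by omega), q, by simpa using hq1, by simpa using hq2, ?_⟩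
        intro k hk
        simpa using hq3 (k + 1) (by omega)

theorem pvP_iff (cs : List Char) : pvP cs = true ↔ ∃ j, j < cs.length ∧
    pvEvd (cs.getD j ' ') = true ∧ pvLead (cs.drop (j + 1)) = true := by
  induction cs with
  | nil => simp [pvP]
  | cons c cs ih =>
    rw [pvP]
    simp only [Bool.or_eq_true, Bool.and_eq_true, ih]
    constructor
    · rintro (⟨h1, h2⟩ | ⟨j, hj1, hj2, hj3⟩)
      · exact ⟨0, by simp, by simpa using h1, by simpa using h2⟩
      · exact ⟨j + 1, by simp; omega, by simpa using hj2, by simpa using hj3⟩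
    · rintro ⟨j, hj1, hj2, hj3⟩
      match j with
      | 0 => exact Or.inl ⟨by simpa using hj2, by simpa using hj3⟩
      | j + 1 => exact Or.inr ⟨j, by simpa using hj1, by simpa using hj2, by simpa using hj3⟩

-- A's answer is pvP
theorem pvA_iff (cs : List Char) :
    (((List.range cs.length).foldl (fun st i => pvInnerA cs i i st)
        ((PySem.Set.empty : PySem.Set Nat), (PySem.Set.empty : PySem.Set Nat))).1.any
      (fun x => PySem.Set.contains
        (((List.range cs.length).foldl (fun st i => pvInnerA cs i i st)
          ((PySem.Set.empty : PySem.Set Nat), (PySem.Set.empty : PySem.Set Nat))).2) x) = true)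
    ↔ pvP cs = true := by
  rw [List.any_eq_true]
  rw [pvP_iff]
  constructor
  · rintro ⟨x, hx1, hx2⟩
    rw [(pvOuterA_mem cs (List.range cs.length) _ x).1] at hx1
    have hx2' : x ∈ (((List.range cs.length).foldl (fun st i => pvInnerA cs i i st)
        ((PySem.Set.empty : PySem.Set Nat), (PySem.Set.empty : PySem.Set Nat)))).2 := by
      simpa [PySem.Set.contains] using hx2
    rw [(pvOuterA_mem cs (List.range cs.length) _ x).2] at hx2'
    rcases hx1 with h | ⟨_, q2, hq2a, hq2b, hq2c, hq2d⟩
    · exact absurd h (by simp [PySem.Set.empty])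
    rcases hx2' with h | ⟨i, _, q, hq1, hqn, hxq, hqe, _⟩
    · exact absurd h (by simp [PySem.Set.empty])
    refine ⟨q, hqn, hqe, ?_⟩
    rw [pvLead_iff]
    subst hxq
    refine ⟨q2 - (q + 1), by simp [List.length_drop]; omega, ?_, ?_⟩
    · rw [pvGetD_drop]
      have : q + 1 + (q2 - (q + 1)) = q2 := by omega
      rw [this]; exact hq2c
    · intro k hk
      rw [pvGetD_drop]
      exact hq2d (q + 1 + k) (by omega) (by omega)
  · rintro ⟨j, hj1, hj2, hj3⟩
    rw [pvLead_iff] at hj3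
    obtain ⟨q', hq'1, hq'2, hq'3⟩ := hj3
    rw [List.length_drop] at hq'1
    rw [pvGetD_drop] at hq'2
    refine ⟨j + 1, ?_, ?_⟩
    · rw [(pvOuterA_mem cs (List.range cs.length) _ (j + 1)).1]
      refine Or.inr ⟨by simp [List.mem_range]; omega, j + 1 + q', by omega, by omega, hq'2, ?_⟩
      intro k hk1 hk2
      rcases Nat.lt_or_ge k (j + 1 + q') with h|h
      · have := hq'3 (k - (j + 1)) (by omega)
        rw [pvGetD_drop] at this
        have hh : j + 1 + (k - (j + 1)) = k := by omega
        rwa [hh] at this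
      · have : k = j + 1 + q' := by omega
        subst this
        exact pvEvd_dig hq'2
    · show PySem.Set.contains _ _ = true
      have : (j + 1) ∈ (((List.range cs.length).foldl (fun st i => pvInnerA cs i i st)
          ((PySem.Set.empty : PySem.Set Nat), (PySem.Set.empty : PySem.Set Nat)))).2 := by
        rw [(pvOuterA_mem cs (List.range cs.length) _ (j + 1)).2]
        refine Or.inr ⟨j, by simpa [List.mem_range] using hj1, j, le_refl j, hj1, rfl, hj2, ?_⟩
        intro k hk1 hk2
        have : k = j := by omega
        subst this
        exact pvEvd_dig hj2
      simpa [PySem.Set.contains] using this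

theorem EvenPairs_eq (str : String) : EvenPairs str = EvenPairs_alt str := by
  unfold EvenPairs EvenPairs_alt
  have hB : (str.toList.foldl pvStepB (0, false)).2 = pvP str.toList := by
    rw [pvFoldB]
    simp
  by_cases h : pvP str.toList = true
  · rw [if_pos ((pvA_iff str.toList).mpr h), if_pos (hB ▸ h)]
  · rw [if_neg (fun hc => h ((pvA_iff str.toList).mp hc)),
        if_neg (fun hc => h (hB ▸ hc))]

-- ===== VERDICT (by name: the statement is the Claim_ definition above) =====
theorem EvenPairs_spec : Claim_equal_EvenPairs := by
  intro str _
  unfold Spec_EvenPairs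
  exact EvenPairs_eq str
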